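-- pv_equiv track=rewrite | github.com/psamp/GT-CS6474 | src/model1.py | calc_features
-- ===== SOURCE A (Python) =====
-- def calc_features(unigrams, bigrams, tokens):
--     features = []
--     for t in tokens:
--         token_set = t.split()
--         ngram_vector = []
--
--         for u in unigrams:
--             ngram_vector.append(1 if u in token_set else 0)
--
--         for bigram in bigrams:
--             pair = ()
--             for i in range(1, len(token_set)):
--                 pair = (token_set[i-1], token_set[i])
--                 if pair == bigram:
--                     break
--             ngram_vector.append(1 if pair == bigram else 0)
--
--         features.append(ngram_vector)
--     return features
-- ===== SOURCE B (Python) =====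
-- def _positions(vocab, offset):
--     pos = {}
--     for i, v in enumerate(vocab):
--         pos.setdefault(v, []).append(offset + i)
--     return pos
--
--
-- def calc_features(unigrams, bigrams, tokens):
--     n = len(unigrams)
--     uni_pos = _positions(unigrams, 0)
--     bi_pos = _positions(bigrams, n)
--     features = []
--     for t in tokens:
--         words = t.split()
--         vec = [0] * (n + len(bigrams))
--         for w in words:
--             for p in uni_pos.get(w, []):
--                 vec[p] = 1
--         for pair in zip(words, words[1:]):
--             for p in bi_pos.get(pair, []):
--                 vec[p] = 1
--         features.append(vec)
--     return features
-- ===== Notes on version B (the rewrite author's own statement) =====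
-- stated objective: alternative
-- what changed: Instead of scanning the whole unigram/bigram vocabulary for every token (with an inner adjacent-pair scan per bigram), B builds inverted position indexes over the vocabulary once (value -> all output positions) and, per token, fills a zero vector by iterating only over the token's words and adjacent word pairs, looking each up in the index; intended as faster (a timing run measured about 5x at n=4096 but could not confirm the largest size).
import Mathlib
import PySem

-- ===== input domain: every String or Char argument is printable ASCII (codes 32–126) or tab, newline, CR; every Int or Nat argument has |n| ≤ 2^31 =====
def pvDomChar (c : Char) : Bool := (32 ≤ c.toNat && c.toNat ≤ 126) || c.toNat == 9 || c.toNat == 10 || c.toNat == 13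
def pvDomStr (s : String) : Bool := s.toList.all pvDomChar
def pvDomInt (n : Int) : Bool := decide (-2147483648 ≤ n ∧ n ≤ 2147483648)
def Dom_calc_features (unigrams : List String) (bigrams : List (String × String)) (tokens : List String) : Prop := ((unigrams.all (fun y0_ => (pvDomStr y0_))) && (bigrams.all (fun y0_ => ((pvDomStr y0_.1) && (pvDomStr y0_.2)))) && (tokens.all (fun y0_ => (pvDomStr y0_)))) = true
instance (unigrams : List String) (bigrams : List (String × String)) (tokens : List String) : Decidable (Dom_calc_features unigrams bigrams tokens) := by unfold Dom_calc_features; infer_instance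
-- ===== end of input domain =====

-- B replaces A's per-token scan of the whole vocabulary by inverted position indexes
-- built once over the vocabulary; equivalence of the two is proved on all inputs.

-- ===== PORT A =====
-- final value of A's variable `pair` after the `for i in range(1, len(token_set))` loop
-- (Python's initial `pair = ()` is modelled as `none`; a bigram, being a pair of strings,
-- never equals `()`). Indices i-1, i are always in range, so `.getD ""` is never used.
def pvPairLoop (ws : List String) (bg : String × String) : List Int → Option (String × String) → Option (String × String)
  | [], pair => pair
  | i :: rest, _ =>
      let pair := some ((PySem.List.pyGet? ws (i - 1)).getD "", (PySem.List.pyGet? ws i).getD "")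
      if pair = some bg then pair else pvPairLoop ws bg rest pair

def calc_features (unigrams : List String) (bigrams : List (String × String)) (tokens : List String) : List (List Int) :=
  tokens.foldl (fun features t =>
    let token_set := PySem.Str.split₀ t
    let ngram_vector : List Int :=
      unigrams.foldl (fun v u => v ++ [if u ∈ token_set then 1 else 0]) []
    let ngram_vector :=
      bigrams.foldl (fun v bigram =>
        let pair := pvPairLoop token_set bigram (PySem.List.pyRange 1 (token_set.length : Int) 1) none
        v ++ [if pair = some bigram then 1 else 0]) ngram_vector
    features ++ [ngram_vector]) []

-- ===== PORT B =====
-- _positions(vocab, offset): value -> list of its output positions (offset + index)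
def pvPositions {α : Type} [BEq α] (vocab : List α) (offset : Int) : PySem.Dict α (List Int) :=
  (PySem.List.enumerate vocab).foldl
    (fun d q => d.modify q.2 [] (· ++ [offset + q.1])) PySem.Dict.empty

def calc_features_alt (unigrams : List String) (bigrams : List (String × String)) (tokens : List String) : List (List Int) :=
  let n := (unigrams.length : Int)
  let uni_pos := pvPositions unigrams 0
  let bi_pos := pvPositions bigrams n
  tokens.foldl (fun features t =>
    let words := PySem.Str.split₀ t
    let vec : List Int := PySem.List.pyRepeat [0] (n + (bigrams.length : Int))
    let vec := words.foldl (fun v w =>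
      (uni_pos.getD w []).foldl (fun v p => PySem.List.pySetD v p 1) v) vec
    -- `vec[p] = 1` never raises: every stored position is < n + len(bigrams); pySetD is its total form
    let vec := (words.zip (PySem.List.slice words (some 1) none)).foldl (fun v pr =>
      (bi_pos.getD pr []).foldl (fun v p => PySem.List.pySetD v p 1) v) vec
    features ++ [vec]) []

-- ===== PRECONDITION & SPEC =====
def Spec_calc_features (unigrams : List String) (bigrams : List (String × String)) (tokens : List String) (out : List (List Int)) : Prop := out = calc_features_alt unigrams bigrams tokens
instance (unigrams : List String) (bigrams : List (String × String)) (tokens : List String) (out : List (List Int)) : Decidable (Spec_calc_features unigrams bigrams tokens out) := by unfold Spec_calc_features; infer_instance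

-- ===== CLAIM (what is proved, stated in full; the proofs are below) =====
def Claim_equal_calc_features : Prop := ∀ (unigrams : List String) (bigrams : List (String × String)) (tokens : List String), Dom_calc_features unigrams bigrams tokens → Spec_calc_features unigrams bigrams tokens (calc_features unigrams bigrams tokens)

-- ===== LEMMAS AND PROOFS =====
theorem pvPairLoop_eq_some_iff (ws : List String) (bg : String × String) :
    ∀ (L : List Int) (p0 : Option (String × String)),
    pvPairLoop ws bg L p0 = some bg ↔
      ((L = [] ∧ p0 = some bg) ∨ ∃ i ∈ L,
        ((PySem.List.pyGet? ws (i - 1)).getD "", (PySem.List.pyGet? ws i).getD "") = bg) := by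
  intro L
  induction L with
  | nil => intro p0; simp [pvPairLoop]
  | cons i rest ih =>
      intro p0
      simp only [pvPairLoop]
      split
      · rename_i h
        simp only [Option.some.injEq] at h
        simp [h]
      · rename_i h
        rw [ih]
        simp only [List.mem_cons]
        constructor
        · rintro (⟨_, hp⟩ | ⟨j, hj, hjeq⟩)
          · exact absurd (by rw [hp]) h
          · exact Or.inr ⟨j, Or.inr hj, hjeq⟩
        · rintro (⟨hnil, _⟩ | ⟨j, (rfl | hj), hjeq⟩)
          · exact absurd hnil (by simp)
          · exact absurd (by rw [hjeq]) h
          · exact Or.inr ⟨j, hj, hjeq⟩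

theorem pvPairFlag_iff (ws : List String) (bg : String × String) :
    (pvPairLoop ws bg (PySem.List.pyRange 1 (ws.length : Int) 1) none = some bg) ↔
      bg ∈ ws.zip ws.tail := by
  rw [pvPairLoop_eq_some_iff]
  constructor
  · rintro (⟨_, h⟩ | ⟨i, hi, heq⟩)
    · exact absurd h (by simp)
    · rw [PySem.List.mem_pyRange_one] at hi
      obtain ⟨h1, h2⟩ := hi
      obtain ⟨j, rfl⟩ : ∃ j : Nat, i = ((j : Nat) : Int) := ⟨i.toNat, by omega⟩
      have hlt : j < ws.length := by omega
      have h1' : 1 ≤ j := by omega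
      rw [List.mem_iff_getElem]
      refine ⟨j - 1, (by simp [List.length_tail]; omega), ?_⟩
      rw [List.getElem_zip, List.getElem_tail]
      have e1 : PySem.List.pyGet? ws ((j : Int) - 1) = ws[j - 1]? := by
        rw [show ((j : Nat) : Int) - 1 = ((j - 1 : Nat) : Int) from by omega,
          PySem.List.pyGet?_natCast]
      rw [e1, PySem.List.pyGet?_natCast] at heq
      simp only [show j - 1 + 1 = j from by omega]
      rw [List.getElem?_eq_getElem (by omega), List.getElem?_eq_getElem hlt] at heq
      simpa using heq
  · intro hmem
    rw [List.mem_iff_getElem] at hmem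
    obtain ⟨j, hj, hjeq⟩ := hmem
    have hjlen : j + 1 < ws.length := by
      simp [List.length_tail] at hj; omega
    refine Or.inr ⟨((j + 1 : Nat) : Int), ?_, ?_⟩
    · rw [PySem.List.mem_pyRange_one]; push_cast; omega
    · rw [List.getElem_zip, List.getElem_tail] at hjeq
      have e1 : ((j + 1 : Nat) : Int) - 1 = ((j : Nat) : Int) := by push_cast; ring
      rw [e1, PySem.List.pyGet?_natCast, PySem.List.pyGet?_natCast]
      rw [List.getElem?_eq_getElem (by omega), List.getElem?_eq_getElem hjlen]
      simpa using hjeq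

-- the nested position-setting loops: result at index k
def pvSetAll (ps : List Int) (v : List Int) : List Int :=
  ps.foldl (fun v p => PySem.List.pySetD v p 1) v

theorem pvSetAll_getElem? (ps : List Int) :
    ∀ (v : List Int) (k : Nat), (∀ p ∈ ps, 0 ≤ p) →
      (pvSetAll ps v)[k]? = if (k : Int) ∈ ps ∧ k < v.length then some 1 else v[k]? := by
  induction ps with
  | nil => intro v k _; simp [pvSetAll]
  | cons p rest ih =>
      intro v k hpos
      have hp : 0 ≤ p := hpos p (List.mem_cons_self ..)
      have hrest : ∀ q ∈ rest, 0 ≤ q := fun q hq => hpos q (List.mem_cons_of_mem _ hq)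
      simp only [pvSetAll, List.foldl_cons]
      rw [show (List.foldl (fun v p => PySem.List.pySetD v p 1) (PySem.List.pySetD v p 1) rest)
            = pvSetAll rest (PySem.List.pySetD v p 1) from rfl, ih _ _ hrest]
      rw [PySem.List.pySetD_of_nonneg _ _ hp]
      simp only [List.length_set, List.getElem?_set, List.mem_cons]
      by_cases hk : (k : Int) ∈ rest
      · by_cases hklen : k < v.length
        · simp [hk, hklen]
        · simp [hk, hklen]; omega
      · by_cases hkp : p.toNat = k
        · have : (k : Int) = p := by omega
          by_cases hklen : k < v.length <;> simp [hkp, hklen, this]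
        · have : ¬ (k : Int) = p := by omega
          simp [hk, hkp, this]

theorem mem_pvPositions_getD {α : Type} [BEq α] [LawfulBEq α]
    (vocab : List α) (off : Int) (c : α) (k : Int) :
    k ∈ (pvPositions vocab off).getD c [] ↔
      ∃ i : Nat, ∃ h : i < vocab.length, vocab[i] = c ∧ k = off + i := by
  have hrw : pvPositions vocab off
      = ((PySem.List.enumerate vocab).map (fun q => (q.2, off + q.1))).foldl
          (fun d p => d.modify p.1 [] (· ++ [p.2])) PySem.Dict.empty := by
    rw [List.foldl_map]
    rfl
  rw [hrw, PySem.Dict.getD_foldl_modify_append]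
  simp only [PySem.Dict.getD_empty, List.nil_append, List.mem_map, List.mem_filter,
    List.mem_map, PySem.List.mem_enumerate_iff]
  constructor
  · rintro ⟨⟨a, b⟩, ⟨⟨⟨i, x⟩, ⟨j, hj, hje⟩, hmap⟩, hfil⟩, hval⟩
    simp only [Prod.mk.injEq] at hje hmap
    obtain ⟨hje1, hje2⟩ := hje
    refine ⟨j, hj, ?_, ?_⟩
    · have : a = vocab[j] := by rw [← hmap.1, ← hje2]
      rw [← this]; exact (beq_iff_eq.mp hfil)
    · rw [← hval, ← hmap.2, hje1]; push_cast; ring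
  · rintro ⟨i, hi, hc, hk⟩
    refine ⟨(vocab[i], off + i), ⟨⟨(((i : Nat) : Int), vocab[i]), ⟨i, hi, by simp⟩, by simp⟩, by simp [hc]⟩, by omega⟩


theorem pvPositions_getD_nonneg {α : Type} [BEq α] [LawfulBEq α]
    (vocab : List α) (off : Int) (hoff : 0 ≤ off) (c : α) :
    ∀ p ∈ (pvPositions vocab off).getD c [], 0 ≤ p := by
  intro p hp
  rw [mem_pvPositions_getD] at hp
  obtain ⟨i, hi, _, rfl⟩ := hp
  omega

theorem pvToken_eq (unigrams : List String) (bigrams : List (String × String)) (ws : List String) :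
    bigrams.foldl (fun v bigram =>
        v ++ [if pvPairLoop ws bigram (PySem.List.pyRange 1 (ws.length : Int) 1) none = some bigram
              then (1 : Int) else 0])
      (unigrams.foldl (fun v u => v ++ [if u ∈ ws then (1 : Int) else 0]) [])
    = pvSetAll
        (ws.flatMap (fun w => (pvPositions unigrams 0).getD w []) ++
         (ws.zip ws.tail).flatMap (fun pr => (pvPositions bigrams (unigrams.length : Int)).getD pr []))
        (List.replicate (unigrams.length + bigrams.length) 0) := by
  rw [PySem.List.foldl_append_singleton_eq_map, PySem.List.foldl_append_singleton_eq_map,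
    List.nil_append]
  set n := unigrams.length with hn
  set m := bigrams.length with hm
  have hpos : ∀ p ∈ ws.flatMap (fun w => (pvPositions unigrams 0).getD w []) ++
      (ws.zip ws.tail).flatMap (fun pr => (pvPositions bigrams (n : Int)).getD pr []), 0 ≤ p := by
    intro p hp
    rcases List.mem_append.mp hp with h | h <;>
    · obtain ⟨x, _, hx⟩ := List.mem_flatMap.mp h
      exact pvPositions_getD_nonneg _ _ (by positivity) _ _ hx
  apply List.ext_getElem?
  intro k
  rw [show pvSetAll
        (ws.flatMap (fun w => (pvPositions unigrams 0).getD w []) ++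
         (ws.zip ws.tail).flatMap (fun pr => (pvPositions bigrams (n : Int)).getD pr []))
        (List.replicate (n + m) 0) = pvSetAll _ _ from rfl,
    pvSetAll_getElem? _ _ _ hpos]
  rw [List.getElem?_append]
  simp only [List.length_map, List.length_replicate]
  by_cases hkn : k < n
  · -- unigram slot
    have hcond : ((k : Int) ∈ ws.flatMap (fun w => (pvPositions unigrams 0).getD w []) ++
        (ws.zip ws.tail).flatMap (fun pr => (pvPositions bigrams (n : Int)).getD pr []))
        ↔ unigrams[k] ∈ ws := by
      rw [List.mem_append, List.mem_flatMap, List.mem_flatMap]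
      constructor
      · rintro (⟨w, hw, hmem⟩ | ⟨pr, hpr, hmem⟩) <;> rw [mem_pvPositions_getD] at hmem
        · obtain ⟨i, hi, hval, hki⟩ := hmem
          have : i = k := by omega
          subst this
          rwa [hval]
        · obtain ⟨j, hj, _, hkj⟩ := hmem
          omega
      · intro hmem
        exact Or.inl ⟨unigrams[k], hmem, by
          rw [mem_pvPositions_getD]
          exact ⟨k, hkn, rfl, by omega⟩⟩
    have hklt : k < n + m := by omega
    rw [if_pos hkn, List.getElem?_map, List.getElem?_eq_getElem hkn]
    by_cases hin : unigrams[k] ∈ ws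
    · rw [if_pos ⟨hcond.mpr hin, hklt⟩]
      simp [hin]
    · rw [if_neg (fun h => hin (hcond.mp h.1)), List.getElem?_replicate, if_pos hklt]
      simp [hin]
  · by_cases hknm : k < n + m
    · -- bigram slot
      have hj : k - n < m := by omega
      have hcond : ((k : Int) ∈ ws.flatMap (fun w => (pvPositions unigrams 0).getD w []) ++
          (ws.zip ws.tail).flatMap (fun pr => (pvPositions bigrams (n : Int)).getD pr []))
          ↔ bigrams[k - n] ∈ ws.zip ws.tail := by
        rw [List.mem_append, List.mem_flatMap, List.mem_flatMap]
        constructor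
        · rintro (⟨w, hw, hmem⟩ | ⟨pr, hpr, hmem⟩) <;> rw [mem_pvPositions_getD] at hmem
          · obtain ⟨i, hi, _, hki⟩ := hmem
            omega
          · obtain ⟨j, hjm, hval, hkj⟩ := hmem
            have : j = k - n := by omega
            subst this
            rwa [hval]
        · intro hmem
          exact Or.inr ⟨bigrams[k - n], hmem, by
            rw [mem_pvPositions_getD]
            exact ⟨k - n, hj, rfl, by omega⟩⟩
      rw [if_neg hkn, List.getElem?_map, List.getElem?_eq_getElem hj]
      by_cases hin : bigrams[k - n] ∈ ws.zip ws.tail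
      · rw [if_pos ⟨hcond.mpr hin, hknm⟩]
        simp [(pvPairFlag_iff ws bigrams[k - n]).mpr hin]
      · rw [if_neg (fun h => hin (hcond.mp h.1)), List.getElem?_replicate, if_pos hknm]
        simp only [Option.map_some, Option.some.injEq]
        rw [if_neg (fun h => hin ((pvPairFlag_iff ws bigrams[k - n]).mp h))]
    · -- past the end: both none
      rw [if_neg hkn]
      rw [List.getElem?_eq_none (by simp; omega), List.getElem?_eq_none (by simp; omega)]
      simp [hknm]

-- ===== VERDICT (by name: the statement is the Claim_ definition above) =====
theorem calc_features_spec : Claim_equal_calc_features := by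
  unfold Claim_equal_calc_features
  intro unigrams bigrams tokens _
  unfold Spec_calc_features calc_features calc_features_alt
  dsimp only
  refine PySem.List.foldl_congr_mem _ _ _ _ ?_
  intro acc t _
  congr 1
  rw [PySem.List.slice_from_one, PySem.List.pyRepeat_singleton,
    show ((unigrams.length : Int) + (bigrams.length : Int)).toNat
        = unigrams.length + bigrams.length from by omega]
  rw [pvToken_eq unigrams bigrams (PySem.Str.split₀ t)]
  simp only [pvSetAll]
  rw [List.foldl_append, List.foldl_flatMap, List.foldl_flatMap]
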